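-- pv_equiv track=rewrite | github.com/pypi-data/pypi-mirror-265 | packages/doy/doy-1.9.tar.gz/doy-1.9/doy/proquint.py | _uint16_to_quint
-- ===== SOURCE A (Python) =====
-- UINT_TO_CONSONANT = "bdfghjklmnprstvz"
--
-- UINT_TO_VOWEL = "aiou"
--
-- MASK_LAST4 = 0xF
--
-- MASK_LAST2 = 0x3
--
-- CHARS_PER_CHUNK = 5
--
-- def _uint16_to_quint(uint16_val):
--     val = uint16_val
--     res = ["?"] * CHARS_PER_CHUNK
--     for i in range(CHARS_PER_CHUNK):
--         if i & 1:
--             res[-i - 1] = UINT_TO_VOWEL[val & MASK_LAST2]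
--             val >>= 2
--         else:
--             res[-i - 1] = UINT_TO_CONSONANT[val & MASK_LAST4]
--             val >>= 4
--     return "".join(res)
-- ===== SOURCE B (Python) =====
-- UINT_TO_CONSONANT = "bdfghjklmnprstvz"
--
-- UINT_TO_VOWEL = "aiou"
--
--
-- def _uint16_to_quint(uint16_val):
--     # Straight-line closed form: each character's index is read directly from
--     # the original value with an absolute shift/mask, most-significant first.
--     v = uint16_val
--     return (
--         UINT_TO_CONSONANT[(v >> 12) & 0xF]
--         + UINT_TO_VOWEL[(v >> 10) & 0x3]
--         + UINT_TO_CONSONANT[(v >> 6) & 0xF]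
--         + UINT_TO_VOWEL[(v >> 4) & 0x3]
--         + UINT_TO_CONSONANT[v & 0xF]
--     )
-- ===== Notes on version B (the rewrite author's own statement) =====
-- stated objective: simpler
-- what changed: Replaces the stateful loop (mutable '?' placeholder list filled back-to-front while the value is incrementally shifted) with a straight-line closed form that extracts each of the five character indices from the original value with fixed absolute shift/mask amounts and concatenates them most-significant-first.
import Mathlib
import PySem

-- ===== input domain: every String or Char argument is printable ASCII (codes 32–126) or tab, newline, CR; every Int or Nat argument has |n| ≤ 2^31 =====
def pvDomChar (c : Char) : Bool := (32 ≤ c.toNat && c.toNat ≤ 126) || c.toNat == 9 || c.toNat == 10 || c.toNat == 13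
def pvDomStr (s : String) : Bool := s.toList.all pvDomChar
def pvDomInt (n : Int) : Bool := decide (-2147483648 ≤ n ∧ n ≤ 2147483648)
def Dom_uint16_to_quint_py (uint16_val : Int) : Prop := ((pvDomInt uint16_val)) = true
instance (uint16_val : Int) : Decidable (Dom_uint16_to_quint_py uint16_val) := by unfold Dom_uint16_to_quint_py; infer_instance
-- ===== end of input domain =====

-- B replaces A's stateful fill-backwards loop by a straight-line closed form reading
-- each character index directly from the input with fixed shifts/masks (objective: simpler).

-- module constants (shared context of both implementations)
def pvUintToConsonant : List Char := "bdfghjklmnprstvz".toList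
def pvUintToVowel : List Char := "aiou".toList

-- ===== PORT A =====
-- res[-i-1] on the length-5 list is res[5-i-1]; i ranges over range(5) so the
-- index is always in range, and val & mask is always a valid in-range index,
-- hence the '?' defaults of getD are never used (exact port).
def uint16_to_quint_py (uint16_val : Int) : String :=
  let step : (Int × List Char) → Nat → (Int × List Char) := fun st i =>
    let val := st.1
    let res := st.2
    if i &&& 1 = 1 then
      (val >>> (2:Nat), res.set (5 - i - 1) (pvUintToVowel.getD (PySem.Int.band val 0x3).toNat '?'))
    else
      (val >>> (4:Nat), res.set (5 - i - 1) (pvUintToConsonant.getD (PySem.Int.band val 0xF).toNat '?'))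
  let out := (PySem.List.pyRange 0 5 1).foldl (fun st i => step st i.toNat) (uint16_val, List.replicate 5 '?')
  String.ofList out.2

-- ===== PORT B =====
def uint16_to_quint_py_alt (uint16_val : Int) : String :=
  let v := uint16_val
  String.ofList
    [ pvUintToConsonant.getD (PySem.Int.band (v >>> (12:Nat)) 0xF).toNat '?'
    , pvUintToVowel.getD (PySem.Int.band (v >>> (10:Nat)) 0x3).toNat '?'
    , pvUintToConsonant.getD (PySem.Int.band (v >>> (6:Nat)) 0xF).toNat '?'
    , pvUintToVowel.getD (PySem.Int.band (v >>> (4:Nat)) 0x3).toNat '?'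
    , pvUintToConsonant.getD (PySem.Int.band v 0xF).toNat '?' ]

-- ===== PRECONDITION & SPEC =====
def Spec_uint16_to_quint_py (uint16_val : Int) (out : String) : Prop := out = uint16_to_quint_py_alt uint16_val
instance (uint16_val : Int) (out : String) : Decidable (Spec_uint16_to_quint_py uint16_val out) := by unfold Spec_uint16_to_quint_py; infer_instance

-- ===== CLAIM (what is proved, stated in full; the proofs are below) =====
def Claim_equal_uint16_to_quint_py : Prop := ∀ (uint16_val : Int), Dom_uint16_to_quint_py uint16_val → Spec_uint16_to_quint_py uint16_val (uint16_to_quint_py uint16_val)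

-- ===== LEMMAS AND PROOFS =====
theorem pv_shiftRight_shiftRight (v : Int) (m n : Nat) : v >>> m >>> n = v >>> (m + n) := by
  rw [Int.shiftRight_add]

-- ===== VERDICT (by name: the statement is the Claim_ definition above) =====
theorem uint16_to_quint_py_spec : Claim_equal_uint16_to_quint_py := by
  intro v _
  unfold Spec_uint16_to_quint_py uint16_to_quint_py uint16_to_quint_py_alt
  simp [PySem.List.pyRange, List.range_succ, List.foldl, List.set, pv_shiftRight_shiftRight]
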